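-- pv_equiv track=rewrite | github.com/hlzhang109/impossibility-watermark | SemStamp/paraphrase_gen_utils.py | compare_ngram_overlap
-- ===== SOURCE A (Python) =====
-- from collections import Counter
--
-- def compare_ngram_overlap(input_ngram, para_ngram):
--     input_c = Counter(input_ngram)
--     para_c = Counter(para_ngram)
--     intersection = list(input_c.keys() & para_c.keys())
--     overlap = 0
--     for i in intersection:
--         overlap += para_c[i]
--     return overlap
-- ===== SOURCE B (Python) =====
-- def compare_ngram_overlap(input_ngram, para_ngram):
--     input_set = set(input_ngram)
--     return sum(1 for x in para_ngram if x in input_set)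
-- ===== Notes on version B (the rewrite author's own statement) =====
-- stated objective: simpler
-- what changed: Replaces the two Counters and the explicit key-set intersection with one membership set over input_ngram and a single pass over para_ngram counting members, so no counts or intersection list are ever built.
import Mathlib
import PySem

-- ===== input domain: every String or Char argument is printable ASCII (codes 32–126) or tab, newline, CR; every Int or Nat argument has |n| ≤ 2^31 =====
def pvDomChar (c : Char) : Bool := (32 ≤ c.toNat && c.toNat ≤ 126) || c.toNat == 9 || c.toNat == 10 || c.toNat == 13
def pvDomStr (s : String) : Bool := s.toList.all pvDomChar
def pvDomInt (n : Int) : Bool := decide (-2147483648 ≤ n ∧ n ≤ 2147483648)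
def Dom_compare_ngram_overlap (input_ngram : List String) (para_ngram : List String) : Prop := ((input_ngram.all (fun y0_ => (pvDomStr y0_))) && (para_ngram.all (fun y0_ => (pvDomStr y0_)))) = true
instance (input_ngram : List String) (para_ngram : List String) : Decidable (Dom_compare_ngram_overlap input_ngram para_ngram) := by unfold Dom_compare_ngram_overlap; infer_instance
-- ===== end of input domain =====

-- B: one membership set over input_ngram and a single pass over para_ngram (simpler: no Counters, no key intersection).
-- ===== PORT A =====
def compare_ngram_overlap (input_ngram : List String) (para_ngram : List String) : Int :=
  let input_c := PySem.Dict.counter input_ngram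
  let para_c := PySem.Dict.counter para_ngram
  let intersection := PySem.Set.inter input_c.keys para_c.keys
  intersection.foldl (fun overlap i => overlap + para_c.getD i 0) 0

-- ===== PORT B =====
def compare_ngram_overlap_alt (input_ngram : List String) (para_ngram : List String) : Int :=
  let input_set := PySem.Set.ofList input_ngram
  para_ngram.foldl (fun acc x => if PySem.Set.contains input_set x then acc + 1 else acc) 0

-- ===== PRECONDITION & SPEC =====
def Spec_compare_ngram_overlap (input_ngram : List String) (para_ngram : List String) (out : Int) : Prop := out = compare_ngram_overlap_alt input_ngram para_ngram
instance (input_ngram : List String) (para_ngram : List String) (out : Int) : Decidable (Spec_compare_ngram_overlap input_ngram para_ngram out) := by unfold Spec_compare_ngram_overlap; infer_instance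

-- ===== CLAIM (what is proved, stated in full; the proofs are below) =====
def Claim_equal_compare_ngram_overlap : Prop := ∀ (input_ngram : List String) (para_ngram : List String), Dom_compare_ngram_overlap input_ngram para_ngram → Spec_compare_ngram_overlap input_ngram para_ngram (compare_ngram_overlap input_ngram para_ngram)

-- ===== LEMMAS AND PROOFS =====
theorem pv_foldl_add_eq_sum (f : String → Int) (l : List String) (a : Int) :
    l.foldl (fun acc k => acc + f k) a = a + (l.map f).sum := by
  induction l generalizing a with
  | nil => simp
  | cons x t ih => simp [List.foldl_cons, ih]; ring

theorem pv_foldl_count_eq_filter (p : String → Bool) (l : List String) (a : Int) :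
    l.foldl (fun acc x => if p x then acc + 1 else acc) a
      = a + ((l.filter p).length : Int) := by
  induction l generalizing a with
  | nil => simp
  | cons x t ih =>
    by_cases h : p x <;> simp [List.foldl_cons, h, ih] <;> ring

theorem pv_sum_indicator (x : String) : ∀ (K : List String), K.Nodup →
    (K.map (fun k => if x = k then (1 : Int) else 0)).sum
      = if x ∈ K then 1 else 0 := by
  intro K
  induction K with
  | nil => simp
  | cons k t ih =>
    intro h
    rcases List.nodup_cons.mp h with ⟨hk, ht⟩
    by_cases hx : x = k
    · subst hx
      have hz : ∀ y ∈ t, (if x = y then (1 : Int) else 0) = 0 := by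
        intro y hy
        exact if_neg (by rintro rfl; exact hk hy)
      simp [List.map_congr_left hz]
    · simp [hx, ih ht]

theorem pv_sum_count_eq_length_filter (K : List String) (hK : K.Nodup) (para : List String) :
    (K.map (fun k => (para.count k : Int))).sum
      = ((para.filter (fun x => K.contains x)).length : Int) := by
  induction para with
  | nil => simp
  | cons x t ih =>
    have hcount : ∀ k : String, ((x :: t).count k : Int)
        = (t.count k : Int) + (if x = k then 1 else 0) := by
      intro k
      by_cases h : x = k <;> simp [h]
    calc (K.map (fun k => ((x :: t).count k : Int))).sum
        = (K.map (fun k => (t.count k : Int) + (if x = k then 1 else 0))).sum := by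
          simp only [hcount]
      _ = (K.map (fun k => (t.count k : Int))).sum
            + (K.map (fun k => if x = k then (1 : Int) else 0)).sum := by
          rw [← List.sum_map_add]
      _ = ((t.filter (fun y => K.contains y)).length : Int) + (if x ∈ K then 1 else 0) := by
          rw [ih, pv_sum_indicator x K hK]
      _ = (((x :: t).filter (fun y => K.contains y)).length : Int) := by
          by_cases hx : x ∈ K
          · simp [hx]
          · simp [hx]


-- ===== VERDICT (by name: the statement is the Claim_ definition above) =====
theorem compare_ngram_overlap_spec : Claim_equal_compare_ngram_overlap := by
  intro input_ngram para_ngram _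
  unfold Spec_compare_ngram_overlap compare_ngram_overlap compare_ngram_overlap_alt
  simp only [PySem.Dict.keys_counter]
  set K := PySem.Set.inter (PySem.Set.ofList input_ngram) (PySem.Set.ofList para_ngram) with hKdef
  have hKnodup : K.Nodup := PySem.Set.nodup_inter _ _ (PySem.Set.nodup_ofList _)
  have hA : K.foldl (fun overlap i => overlap + (PySem.Dict.counter para_ngram).getD i 0) 0
      = (K.map (fun k => (para_ngram.count k : Int))).sum := by
    simp only [PySem.Dict.getD_counter]
    rw [pv_foldl_add_eq_sum]
    simp
  rw [hA, pv_sum_count_eq_length_filter K hKnodup,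
      pv_foldl_count_eq_filter]
  have hfilter : para_ngram.filter (fun x => List.contains K x)
      = para_ngram.filter ((PySem.Set.ofList input_ngram).contains) := by
    apply List.filter_congr
    intro x hx
    simp only [PySem.Set.contains_eq_listContains]
    by_cases h : x ∈ PySem.Set.ofList input_ngram
    · have hxK : x ∈ K := by
        rw [hKdef]
        exact (PySem.Set.mem_inter _ _ _).mpr ⟨h, (PySem.Set.mem_ofList _ _).mpr hx⟩
      simp [hxK, h]
    · have hxK : x ∉ K := fun hc => h ((PySem.Set.mem_inter _ _ _).mp hc).1
      simp [hxK, h]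
  rw [hfilter]
  simp
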